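-- pv_equiv track=rewrite | github.com/EParisot/ComputorV1 | srcs/ft_reduct.py | ft_split
-- ===== SOURCE A (Python) =====
-- def ft_prod(member_list, variable):
--     for elem in member_list:
--         i = 0
--         for char in elem:
--             if char == variable:
--                 i = i + 1
--         if "*" in elem or "/" in elem:
--             if i > 0:
--                 #TODO make var product
--                 pass
--             else:
--                 #TODO make simple product
--                 pass
--     return(member_list)
--
-- def ft_split(member, variable):
--     reduced_list = []
--     i = 0
--     while (i < len(member)):
--         if member[i] in "+-" or i == 0:
--             j = i + 1
--             while (j < len(member) and not(member[j] in "+-")): #Between each "+" or "-":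
--                 j = j + 1
--             signed = member[i:j]                                #Slice a single member
--             if not(member[i] in "+-") and i == 0:
--                 signed = "+" + signed                           #Append "+" if needed
--             reduced_list.append(signed)
--             i = j - 1
--         i = i + 1
--     reduced_list = ft_prod(reduced_list, variable)              #Make member product
--     if reduced_list:
--         return (reduced_list)
--     else:
--         return ([])
-- ===== SOURCE B (Python) =====
-- def ft_split(member, variable):
--     # single left-to-right pass with a current-token accumulator
--     tokens = []
--     cur = ""
--     for ch in member:
--         if ch in "+-":
--             if cur:
--                 tokens.append(cur if cur[0] in "+-" else "+" + cur)
--             cur = ch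
--         else:
--             cur += ch
--     if cur:
--         tokens.append(cur if cur[0] in "+-" else "+" + cur)
--     return tokens
-- ===== Notes on version B (the rewrite author's own statement) =====
-- stated objective: simpler
-- what changed: Replaced A's index-driven outer/inner while loops with slicing (and the no-op ft_prod pass) by a single left-to-right pass that accumulates the current token and flushes it at each sign character (no re-scan/slice per token).
import Mathlib
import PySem

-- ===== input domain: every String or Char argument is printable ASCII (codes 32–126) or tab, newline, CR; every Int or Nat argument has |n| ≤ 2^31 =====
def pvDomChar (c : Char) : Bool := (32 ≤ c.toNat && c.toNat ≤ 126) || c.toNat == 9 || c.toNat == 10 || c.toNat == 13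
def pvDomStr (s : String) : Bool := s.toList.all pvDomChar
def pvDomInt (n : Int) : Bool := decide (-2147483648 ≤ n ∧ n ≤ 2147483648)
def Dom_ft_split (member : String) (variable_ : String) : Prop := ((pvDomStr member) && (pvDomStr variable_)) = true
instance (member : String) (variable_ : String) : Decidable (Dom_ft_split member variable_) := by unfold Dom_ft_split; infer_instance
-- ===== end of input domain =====

-- B replaces A's index-driven nested while loops (and the no-op ft_prod pass) by a single
-- left-to-right scan with a current-token accumulator; same return value, simpler code.

-- `c in "+-"` (both Pythons contain this literal test)
def pvIsSign (c : Char) : Bool := c == '+' || c == '-'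

-- ===== PORT A =====
-- inner while loop: advance j while j < len(member) and member[j] not in "+-"
def ftSplitInner (cs : List Char) (j : Nat) : Nat :=
  if h : j < cs.length then
    if pvIsSign cs[j] then j else ftSplitInner cs (j + 1)
  else j
termination_by cs.length - j

-- the outer loop needs this for termination (cited in decreasing_by)
theorem ftSplitInner_ge (cs : List Char) (j : Nat) : j ≤ ftSplitInner cs j := by
  unfold ftSplitInner
  split
  · split
    · exact le_refl _
    · have := ftSplitInner_ge cs (j + 1); omega
  · exact le_refl _
termination_by cs.length - j

-- outer while loop over i, accumulating reduced_list
def ftSplitOuter (cs : List Char) (i : Nat) (acc : List String) : List String :=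
  if h : i < cs.length then
    if pvIsSign cs[i] || i == 0 then
      let j := ftSplitInner cs (i + 1)
      let signed := PySem.List.slice cs (some (i : Int)) (some (j : Int))   -- member[i:j]
      let signed := if !pvIsSign cs[i] && i == 0 then '+' :: signed else signed
      ftSplitOuter cs ((j - 1) + 1) (acc ++ [String.ofList signed])            -- i = j - 1; i = i + 1
    else ftSplitOuter cs (i + 1) acc
  else acc
termination_by cs.length - i
decreasing_by
  · have := ftSplitInner_ge cs (i + 1); omega
  · omega

-- ft_prod's loop only updates a local counter and both inner branches are 'pass';
-- it returns its first argument unchanged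
def ft_prod (member_list : List String) (variable_ : String) : List String :=
  member_list

def ft_split (member : String) (variable_ : String) : List String :=
  let reduced := ft_prod (ftSplitOuter member.toList 0 []) variable_
  if reduced = [] then [] else reduced

-- ===== PORT B =====
-- `if cur: tokens.append(cur if cur[0] in "+-" else "+" + cur)`
def pvFlush (tokens : List String) (cur : List Char) : List String :=
  match cur with
  | [] => tokens
  | c :: _ => tokens ++ [String.ofList (if pvIsSign c then cur else '+' :: cur)]

-- the for loop of Source B over the characters, carrying (tokens, cur)
def ftSplitAltGo (cs : List Char) (tokens : List String) (cur : List Char) : List String :=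
  match cs with
  | [] => pvFlush tokens cur
  | c :: rest =>
    if pvIsSign c then ftSplitAltGo rest (pvFlush tokens cur) [c]
    else ftSplitAltGo rest tokens (cur ++ [c])

def ft_split_alt (member : String) (variable_ : String) : List String :=
  ftSplitAltGo member.toList [] []

-- ===== PRECONDITION & SPEC =====
def Spec_ft_split (member : String) (variable_ : String) (out : List String) : Prop := out = ft_split_alt member variable_
instance (member : String) (variable_ : String) (out : List String) : Decidable (Spec_ft_split member variable_ out) := by unfold Spec_ft_split; infer_instance

-- ===== CLAIM (what is proved, stated in full; the proofs are below) =====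
def Claim_equal_ft_split : Prop := ∀ (member : String) (variable_ : String), Dom_ft_split member variable_ → Spec_ft_split member variable_ (ft_split member variable_)

-- ===== LEMMAS AND PROOFS =====

-- canonical tokenization both ports are reduced to: after the first token the string is a
-- sequence of (sign, sign-free text) chunks
def tokRest : List Char → List (List Char)
  | [] => []
  | s :: rest =>
      (s :: rest.takeWhile (fun c => !pvIsSign c)) :: tokRest (rest.dropWhile (fun c => !pvIsSign c))
termination_by cs => cs.length
decreasing_by
  have := List.length_dropWhile_le (fun c => !pvIsSign c) rest
  simp at *; omega

def specTokens (cs : List Char) : List (List Char) :=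
  let t0 := cs.takeWhile (fun c => !pvIsSign c)
  (if t0 = [] then [] else ['+' :: t0]) ++ tokRest (cs.dropWhile (fun c => !pvIsSign c))

theorem ftSplitInner_eq (cs : List Char) (j : Nat) :
    ftSplitInner cs j = j + ((cs.drop j).takeWhile (fun c => !pvIsSign c)).length := by
  unfold ftSplitInner
  split
  · rename_i h
    split
    · rename_i hs
      rw [List.drop_eq_getElem_cons h, List.takeWhile_cons]
      simp [hs]
    · rename_i hs
      rw [ftSplitInner_eq cs (j + 1), List.drop_eq_getElem_cons h, List.takeWhile_cons]
      have hb : (!pvIsSign cs[j]) = true := by simp [hs]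
      simp only [hb, if_true, List.length_cons]
      omega
  · rename_i h
    rw [List.drop_eq_nil_of_le (by omega)]
    simp
termination_by cs.length - j

theorem outer_eq (cs : List Char) (i : Nat) (acc : List String)
    (hle : i ≤ cs.length) (hsign : ∀ h : i < cs.length, pvIsSign cs[i]) :
    ftSplitOuter cs i acc = acc ++ (tokRest (cs.drop i)).map String.ofList := by
  unfold ftSplitOuter
  split
  · rename_i h
    have hs := hsign h
    rw [if_pos (by simp [hs])]
    have hji : i + 1 ≤ ftSplitInner cs (i + 1) := ftSplitInner_ge cs (i + 1)
    have hjeq := ftSplitInner_eq cs (i + 1)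
    set t := (cs.drop (i + 1)).takeWhile (fun c => !pvIsSign c) with ht
    set j := ftSplitInner cs (i + 1) with hj
    have htake : t = (cs.drop (i + 1)).take t.length :=
      List.prefix_iff_eq_take.mp (List.takeWhile_prefix _)
    have hdropj : cs.drop j = (cs.drop (i + 1)).dropWhile (fun c => !pvIsSign c) := by
      rw [hjeq, ← List.drop_drop]
      conv_lhs => rw [← List.takeWhile_append_dropWhile (p := fun c => !pvIsSign c) (l := cs.drop (i + 1)), ← ht]
      exact List.drop_left ..
    have hslice : PySem.List.slice cs (some (i : Int)) (some (j : Int)) = cs[i] :: t := by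
      rw [PySem.List.slice_natCast, List.drop_eq_getElem_cons h]
      have : j - i = t.length + 1 := by omega
      rw [this, List.take_succ_cons, ← htake]
    have hcond : (!pvIsSign cs[i] && i == 0) = false := by simp [hs]
    have hstep : (j - 1) + 1 = j := by omega
    have hlen : t.length ≤ (cs.drop (i + 1)).length := (List.takeWhile_prefix _).length_le
    rw [List.length_drop] at hlen
    have hrec := outer_eq cs j (acc ++ [String.ofList (cs[i] :: t)]) (by omega)
      (by
        intro hjlt
        by_contra hns
        have hcons : cs.drop j = cs[j] :: cs.drop (j + 1) := List.drop_eq_getElem_cons hjlt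
        rw [hdropj] at hcons
        have := List.head?_dropWhile_not (fun c => !pvIsSign c) (cs.drop (i + 1))
        rw [hcons, List.head?_cons] at this
        simp only [Bool.not_eq_false'] at this
        exact hns this)
    simp only [hslice, hcond, Bool.false_eq_true, if_false, hstep]
    rw [hrec]
    rw [List.drop_eq_getElem_cons h]
    rw [tokRest, ← ht, ← hdropj]
    simp
  · rename_i h
    rw [List.drop_eq_nil_of_le (by omega)]
    simp [tokRest]
termination_by cs.length - i

theorem tw_split (t : List Char) (c : Char) (l : List Char)
    (ht : ∀ x ∈ t, ¬ pvIsSign x) (hc : pvIsSign c) :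
    (t ++ c :: l).takeWhile (fun x => !pvIsSign x) = t ∧
      (t ++ c :: l).dropWhile (fun x => !pvIsSign x) = c :: l := by
  induction t with
  | nil => simp [List.takeWhile_cons, List.dropWhile_cons, hc]
  | cons a t ih =>
    have ha := ht a (List.mem_cons_self ..)
    have := ih (fun x hx => ht x (List.mem_cons_of_mem _ hx))
    simp [List.takeWhile_cons, List.dropWhile_cons, ha, this]

theorem outer_zero (cs : List Char) :
    ftSplitOuter cs 0 [] = (specTokens cs).map String.ofList := by
  match hcs : cs with
  | [] => simp [ftSplitOuter, specTokens, tokRest]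
  | c :: rest =>
    by_cases hc : pvIsSign c
    · rw [outer_eq (c :: rest) 0 [] (by omega) (by intro _; simpa using hc)]
      simp [specTokens, List.takeWhile_cons, List.dropWhile_cons, hc]
    · unfold ftSplitOuter
      rw [dif_pos (by simp)]
      have h0 : (c :: rest)[0] = c := rfl
      rw [if_pos (by simp)]
      have hji : 1 ≤ ftSplitInner (c :: rest) 1 := ftSplitInner_ge ..
      have hjeq := ftSplitInner_eq (c :: rest) 1
      set t := ((c :: rest).drop 1).takeWhile (fun x => !pvIsSign x) with ht
      set j := ftSplitInner (c :: rest) 1 with hj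
      have htake : t = ((c :: rest).drop 1).take t.length :=
        List.prefix_iff_eq_take.mp (List.takeWhile_prefix _)
      have hdropj : (c :: rest).drop j = ((c :: rest).drop 1).dropWhile (fun x => !pvIsSign x) := by
        rw [hjeq, ← List.drop_drop]
        conv_lhs => rw [← List.takeWhile_append_dropWhile (p := fun x => !pvIsSign x)
          (l := (c :: rest).drop 1), ← ht]
        exact List.drop_left ..
      have hr : (c :: rest).drop 1 = rest := rfl
      rw [hr] at htake
      have hslice : PySem.List.slice (c :: rest) (some ((0 : Nat) : Int)) (some (j : Int)) = c :: t := by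
        rw [Nat.cast_zero, PySem.List.slice_zero_start, PySem.List.slice_to_natCast]
        have hj1 : j = t.length + 1 := by omega
        rw [hj1, List.take_succ_cons, ← htake]
      have hcond : (!pvIsSign (c :: rest)[0] && (0 : Nat) == 0) = true := by simp [h0, hc]
      have hlen : t.length ≤ ((c :: rest).drop 1).length := (List.takeWhile_prefix _).length_le
      simp only [List.length_drop, List.length_cons] at hlen
      have hstep : (j - 1) + 1 = j := by omega
      have hrec := outer_eq (c :: rest) j [String.ofList ('+' :: c :: t)]
        (by simp; omega)
        (by
          intro hjlt
          by_contra hns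
          have hcons : (c :: rest).drop j = (c :: rest)[j] :: (c :: rest).drop (j + 1) :=
            List.drop_eq_getElem_cons hjlt
          rw [hdropj] at hcons
          have := List.head?_dropWhile_not (fun x => !pvIsSign x) ((c :: rest).drop 1)
          rw [hcons, List.head?_cons] at this
          simp only [Bool.not_eq_false'] at this
          exact hns this)
      simp only [hslice, hcond, if_true, hstep, List.nil_append]
      rw [hrec, hdropj]
      have htw : (c :: rest).takeWhile (fun x => !pvIsSign x) = c :: t := by
        rw [List.takeWhile_cons]
        simp [hc, ht]
      simp [specTokens, htw, List.dropWhile_cons, hc]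

theorem a_eq_spec (cs : List Char) (variable_ : String) :
    ft_split (String.ofList cs) variable_ = (specTokens cs).map String.ofList := by
  show (let reduced := ft_prod (ftSplitOuter (String.ofList cs).toList 0 []) variable_;
        if reduced = [] then [] else reduced) = _
  simp only [String.toList_ofList, ft_prod, outer_zero]
  split
  · rename_i hnil; rw [← hnil]
  · rfl

theorem b1 (cs : List Char) (tokens : List String) (s : Char) (t : List Char)
    (hs : pvIsSign s) (ht : ∀ c ∈ t, ¬ pvIsSign c) :
    ftSplitAltGo cs tokens (s :: t) = tokens ++ (tokRest (s :: (t ++ cs))).map String.ofList := by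
  match cs with
  | [] =>
    have h1 : t.takeWhile (fun c => !pvIsSign c) = t :=
      List.takeWhile_eq_self_iff.mpr (by intro x hx; simpa using ht x hx)
    have h2 : t.dropWhile (fun c => !pvIsSign c) = [] :=
      List.dropWhile_eq_nil_iff.mpr (by intro x hx; simpa using ht x hx)
    rw [List.append_nil, tokRest]
    simp [ftSplitAltGo, pvFlush, hs, h1, h2, tokRest]
  | c :: rest =>
    by_cases hc : pvIsSign c
    · simp only [ftSplitAltGo, hc, if_true]
      rw [b1 rest (pvFlush tokens (s :: t)) c [] hc (by simp)]
      have h := tw_split t c rest ht hc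
      conv_rhs => rw [tokRest]
      simp [pvFlush, hs, h.1, h.2, tokRest]
    · simp only [ftSplitAltGo, hc, Bool.false_eq_true, if_false]
      have hcons : (s :: t) ++ [c] = s :: (t ++ [c]) := rfl
      rw [hcons, b1 rest tokens s (t ++ [c]) hs
        (by
          intro x hx
          rcases List.mem_append.mp hx with h | h
          · exact ht x h
          · simp only [List.mem_singleton] at h; subst h; exact hc)]
      have : (t ++ [c]) ++ rest = t ++ c :: rest := by simp
      rw [this]

theorem b2 (cs : List Char) (tokens : List String) (t : List Char)
    (hne : t ≠ []) (ht : ∀ c ∈ t, ¬ pvIsSign c) :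
    ftSplitAltGo cs tokens t =
      tokens ++ (('+' :: (t ++ cs.takeWhile (fun c => !pvIsSign c)))
        :: tokRest (cs.dropWhile (fun c => !pvIsSign c))).map String.ofList := by
  match cs with
  | [] =>
    obtain ⟨x, t', rfl⟩ := List.exists_cons_of_ne_nil hne
    have hx := ht x (List.mem_cons_self ..)
    simp [ftSplitAltGo, pvFlush, hx, tokRest]
  | c :: rest =>
    by_cases hc : pvIsSign c
    · simp only [ftSplitAltGo, hc, if_true]
      rw [b1 rest (pvFlush tokens t) c [] hc (by simp)]
      obtain ⟨x, t', rfl⟩ := List.exists_cons_of_ne_nil hne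
      have hx := ht x (List.mem_cons_self ..)
      simp [pvFlush, hx, List.takeWhile_cons, List.dropWhile_cons, hc]
    · simp only [ftSplitAltGo, hc, Bool.false_eq_true, if_false]
      rw [b2 rest tokens (t ++ [c]) (by simp)
        (by
          intro x hx
          rcases List.mem_append.mp hx with h | h
          · exact ht x h
          · simp only [List.mem_singleton] at h; subst h; exact hc)]
      simp [List.takeWhile_cons, List.dropWhile_cons, hc]

theorem b_eq_spec (cs : List Char) (variable_ : String) :
    ft_split_alt (String.ofList cs) variable_ = (specTokens cs).map String.ofList := by
  unfold ft_split_alt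
  rw [String.toList_ofList]
  match cs with
  | [] => simp [ftSplitAltGo, pvFlush, specTokens, tokRest]
  | c :: rest =>
    by_cases hc : pvIsSign c
    · simp only [ftSplitAltGo, hc, if_true]
      rw [b1 rest (pvFlush [] []) c [] hc (by simp)]
      simp [pvFlush, specTokens, List.takeWhile_cons, hc]
    · simp only [ftSplitAltGo, hc, Bool.false_eq_true, if_false, List.nil_append]
      rw [show ([c] : List Char) = [] ++ [c] from rfl] at *
      rw [b2 rest [] ([] ++ [c]) (by simp) (by simp [hc])]
      simp [specTokens, List.dropWhile_cons, hc]

-- ===== VERDICT (by name: the statement is the Claim_ definition above) =====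
theorem ft_split_spec : Claim_equal_ft_split := by
  intro member variable_ _
  unfold Spec_ft_split
  have h1 := a_eq_spec member.toList variable_
  have h2 := b_eq_spec member.toList variable_
  simp only [String.ofList_toList] at h1 h2   -- String.ofList member.toList = member
  rw [h1, h2]
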